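-- pv_equiv track=rewrite | github.com/almarklein/visvis | visvis/core/shaders.py | _stripCode
-- ===== SOURCE A (Python) =====
-- def _stripCode(code):
--     """ Strip the code of its minimum indentation. Also strip empty
--     lines before and after the actual code.
--     """
--     # Strip empy trailing lines
--     code = code.rstrip()
--
--     # Find minimum indentation, skip first empty lines
--     lines1 = []
--     minIndent = 99999999
--     encounteredRealLine = False
--     for line1 in code.splitlines():
--         line2 = line1.lstrip()
--         line3 = line2.rstrip()
--         if encounteredRealLine or line3:
--             lines1.append(line1)
--         if line3:
--             encounteredRealLine = True
--             indent = len(line1) - len(line2)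
--             minIndent = min(minIndent, indent)
--
--     # Remove minimum indentation and trailing whitespace
--     lines2 = []
--     for line1 in lines1:
--         lines2.append(line1[minIndent:].rstrip())
--     return '\n'.join(lines2)
-- ===== SOURCE B (Python) =====
-- def _stripCode(code):
--     lines = code.rstrip().splitlines()
--     # drop leading blank lines
--     while lines and not lines[0].strip():
--         lines.pop(0)
--     if not lines:
--         return ''
--     # Peel whitespace columns: as long as every non-blank line still starts with a
--     # whitespace character, cut one leading character off every line.  No indentation
--     # width is ever computed; the loop stops by itself at the margin of the least
--     # indented line.
--     while all((not l.strip()) or l[0].isspace() for l in lines):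
--         lines = [l[1:] for l in lines]
--     return '\n'.join(l.rstrip() for l in lines)
-- ===== Notes on version B (the rewrite author's own statement) =====
-- stated objective: alternative
-- what changed: A computes the minimum indentation width in a fused state-machine pass (encounteredRealLine flag, 99999999 sentinel) and then slices it off; B never computes any indentation width: after dropping leading blank lines it repeatedly peels one leading character off every line while every non-blank line still starts with whitespace, stopping by itself at the least-indented margin.
import Mathlib
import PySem

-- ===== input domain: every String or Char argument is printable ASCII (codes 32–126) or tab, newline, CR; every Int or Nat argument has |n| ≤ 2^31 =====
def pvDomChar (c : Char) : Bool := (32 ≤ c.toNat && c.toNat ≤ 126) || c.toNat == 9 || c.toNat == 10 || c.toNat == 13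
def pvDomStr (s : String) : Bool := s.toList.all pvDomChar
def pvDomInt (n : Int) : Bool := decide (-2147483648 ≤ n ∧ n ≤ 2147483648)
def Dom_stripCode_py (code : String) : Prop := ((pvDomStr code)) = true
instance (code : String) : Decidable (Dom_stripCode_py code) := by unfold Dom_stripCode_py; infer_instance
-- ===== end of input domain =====

-- B replaces A's fused min-indent state machine by a column-peeling loop: it never computes
-- any indentation width, it repeatedly cuts one leading character off every line while every
-- non-blank line still starts with whitespace (objective: alternative algorithm).

-- ===== PORT A =====
-- state: (lines1, minIndent, encounteredRealLine)
def pvStepA (st : List String × Int × Bool) (line1 : String) : List String × Int × Bool :=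
  let line2 := PySem.Str.lstrip line1
  let line3 := PySem.Str.rstrip line2
  let lines1 := if st.2.2 || !(line3 == "") then st.1 ++ [line1] else st.1
  if !(line3 == "") then
    (lines1, min st.2.1 ((PySem.Str.len line1 : Int) - (PySem.Str.len line2 : Int)), true)
  else
    (lines1, st.2.1, st.2.2)

def stripCode_py (code : String) : String :=
  let code1 := PySem.Str.rstrip code
  let st := (PySem.Str.splitlines code1).foldl pvStepA ([], 99999999, false)
  PySem.Str.join "\n" (st.1.map (fun line1 => PySem.Str.rstrip (PySem.Str.slice line1 (some st.2.1) none)))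

-- ===== PORT B =====
-- Python's 'not l.strip()' blank test
def pvBlank (l : String) : Bool := PySem.Str.strip l == ""

-- Python's 'all((not l.strip()) or l[0].isspace() for l in lines)'
def pvPeelGuard (ls : List String) : Bool :=
  ls.all (fun l =>
    if pvBlank l then true
    else
      match PySem.Str.pyGet? l 0 with
      | some c => PySem.Chars.isspace c
      | none => false)  -- unreachable: a non-blank line is nonempty

-- the 'while all(...): lines = [l[1:] for l in lines]' loop; fuel only makes it total
def pvPeel (fuel : Nat) (ls : List String) : List String :=
  match fuel with
  | 0 => ls
  | f + 1 =>
    if pvPeelGuard ls then pvPeel f (ls.map (fun l => PySem.Str.slice l (some 1) none))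
    else ls

def stripCode_py_alt (code : String) : String :=
  let lines := (PySem.Str.splitlines (PySem.Str.rstrip code)).dropWhile pvBlank
  match lines with
  | [] => ""
  | l0 :: _ =>
    -- the loop runs at most (length of the first, non-blank line) times
    PySem.Str.join "\n" ((pvPeel l0.toList.length lines).map PySem.Str.rstrip)

-- ===== PRECONDITION & SPEC =====
def pvIndent (l : String) : Int :=
  (PySem.Str.len l : Int) - (PySem.Str.len (PySem.Str.lstrip l) : Int)

-- Pre_ excludes only the degenerate inputs (≥ 10^8 characters long) on which every non-blank
-- line has more than 99999999 leading whitespace characters, where A's sentinel 99999999 caps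
-- the removed indentation while B removes the true minimum indent.
def Pre_stripCode_py (code : String) : Prop :=
  (∃ l ∈ PySem.Str.splitlines (PySem.Str.rstrip code), pvBlank l = false) →
  (∃ l ∈ PySem.Str.splitlines (PySem.Str.rstrip code), pvBlank l = false ∧ pvIndent l ≤ 99999999)
instance (code : String) : Decidable (Pre_stripCode_py code) := by unfold Pre_stripCode_py; infer_instance
def pvWitness_stripCode_py : String := "\n  x\n\n   y\n"
def Spec_stripCode_py (code : String) (out : String) : Prop := out = stripCode_py_alt code
instance (code : String) (out : String) : Decidable (Spec_stripCode_py code out) := by unfold Spec_stripCode_py; infer_instance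

-- ===== CLAIM (what is proved, stated in full; the proofs are below) =====
def Claim_equal_stripCode_py : Prop := ∀ (code : String), Dom_stripCode_py code → Pre_stripCode_py code → Spec_stripCode_py code (stripCode_py code)

-- ===== LEMMAS AND PROOFS =====

-- A's blank test 'rstrip(lstrip(l))' agrees with B's 'strip(l)'.
lemma pvLine3_eq (l : String) :
    PySem.Str.rstrip (PySem.Str.lstrip l) = PySem.Str.strip l := by
  simp [PySem.Str.rstrip, PySem.Str.lstrip, PySem.Str.strip, PySem.Chars.strip]

lemma pvLine3_blank (l : String) :
    (PySem.Str.rstrip (PySem.Str.lstrip l) == "") = pvBlank l := by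
  rw [pvLine3_eq]; rfl

-- the min-accumulator of A's loop
def pvMinFold (m : Int) (ls : List String) : Int :=
  ls.foldl (fun m l => if pvBlank l then m else min m (pvIndent l)) m

lemma pvFoldA_go (ls : List String) : ∀ (acc : List String) (m : Int) (b : Bool),
    ls.foldl pvStepA (acc, m, b) =
      (acc ++ (if b then ls else ls.dropWhile pvBlank), pvMinFold m ls,
       b || ls.any (fun l => !pvBlank l)) := by
  induction ls with
  | nil => intro acc m b; simp [pvMinFold]
  | cons l ls ih =>
    intro acc m b
    simp only [List.foldl_cons, pvStepA, pvLine3_blank, pvMinFold, List.dropWhile_cons,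
      List.any_cons]
    cases hb : pvBlank l <;> cases b <;>
      simp [ih, pvMinFold, pvIndent, List.append_assoc, PySem.Str.len, PySem.Str.lstrip]

lemma pvFoldl_min_min (xs : List Int) : ∀ a b : Int,
    xs.foldl min (min a b) = min a (xs.foldl min b) := by
  induction xs with
  | nil => intro a b; rfl
  | cons x xs ih =>
    intro a b
    have h : min (min a b) x = min a (min b x) := by omega
    simp only [List.foldl_cons, h, ih]

lemma pvMinFold_eq (ls : List String) : ∀ m : Int,
    pvMinFold m ls =
      match (ls.filter (fun l => !pvBlank l)).map pvIndent with
      | [] => m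
      | x :: xs => min m (xs.foldl min x) := by
  induction ls with
  | nil => intro m; rfl
  | cons l ls ih =>
    intro m
    cases hb : pvBlank l with
    | true =>
      simp only [pvMinFold, List.foldl_cons, List.filter_cons, hb]
      simp only [pvMinFold] at ih
      simp [ih m]
    | false =>
      simp only [pvMinFold, List.foldl_cons, List.filter_cons, hb]
      have := ih (min m (pvIndent l))
      simp only [pvMinFold] at this
      simp only [Bool.false_eq_true, if_false, Bool.not_false, if_true, List.map_cons, this]
      cases hrest : (ls.filter (fun l => !pvBlank l)).map pvIndent with
      | nil => rfl
      | cons x xs =>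
        simp only [List.foldl_cons, pvFoldl_min_min xs (pvIndent l) x]
        exact min_assoc m (pvIndent l) (List.foldl min x xs)

lemma pvFoldl_min_le_mem {A : Type} [LinearOrder A] (xs : List A) :
    ∀ (a y : A), y ∈ a :: xs → xs.foldl min a ≤ y := by
  induction xs with
  | nil =>
    intro a y hy
    simp only [List.mem_cons, List.not_mem_nil, or_false] at hy
    subst hy; simp
  | cons x xs ih =>
    intro a y hy
    simp only [List.foldl_cons]
    have hax := ih (min a x) (min a x) List.mem_cons_self
    simp only [List.mem_cons] at hy
    rcases hy with rfl | rfl | h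
    · exact le_trans hax (min_le_left _ _)
    · exact le_trans hax (min_le_right _ _)
    · exact ih (min a x) y (List.mem_cons_of_mem _ h)

lemma pvFoldl_min_mem {A : Type} [LinearOrder A] (xs : List A) :
    ∀ a : A, xs.foldl min a ∈ a :: xs := by
  induction xs with
  | nil => intro a; simp
  | cons x xs ih =>
    intro a
    simp only [List.foldl_cons]
    have h := ih (min a x)
    simp only [List.mem_cons] at h ⊢
    rcases min_choice a x with hm | hm <;> rw [hm] at h <;> rw [hm] <;> tauto

lemma pvFoldl_min_cast (xs : List Nat) : ∀ a : Nat,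
    ((xs.foldl min a : Nat) : Int) = (xs.map (Nat.cast : Nat → Int)).foldl min (a : Int) := by
  induction xs with
  | nil => intro a; rfl
  | cons x xs ih =>
    intro a
    rw [List.map_cons, List.foldl_cons, List.foldl_cons, ih, Nat.cast_min]

lemma pvMinFold_all_blank (ls : List String) : ∀ m, (∀ l ∈ ls, pvBlank l = true) → pvMinFold m ls = m := by
  induction ls with
  | nil => intro m _; rfl
  | cons l ls ih =>
    intro m h
    simp only [pvMinFold, List.foldl_cons, h l (by simp), if_true]
    exact ih m (fun x hx => h x (List.mem_cons_of_mem _ hx))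

lemma pvDropWhile_head (p : String → Bool) (xs : List String) :
    ∀ h t, xs.dropWhile p = h :: t → p h = false := by
  induction xs with
  | nil => intro h t hx; simp at hx
  | cons x xs ih =>
    intro h t hx
    by_cases hp : p x = true
    · rw [List.dropWhile_cons_of_pos hp] at hx; exact ih h t hx
    · rw [List.dropWhile_cons_of_neg hp] at hx
      cases hx; simpa using hp

-- minFold over the whole line list equals minFold over the lines after the leading blanks
lemma pvMinFold_dropWhile (ls : List String) (m : Int) :
    pvMinFold m ls = pvMinFold m (ls.dropWhile pvBlank) := by
  conv_lhs => rw [← List.takeWhile_append_dropWhile (p := pvBlank) (l := ls)]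
  unfold pvMinFold
  rw [List.foldl_append]
  congr 1
  exact pvMinFold_all_blank _ m (fun l hl => List.mem_takeWhile_imp hl)

-- ---- B-side lemmas: the peeling loop removes exactly the minimum indentation ----

def pvIndNat (l : String) : Nat := (l.toList.takeWhile PySem.Chars.isspace).length

lemma pvIndent_eq (l : String) : pvIndent l = (pvIndNat l : Int) := by
  have hlen := congrArg List.length
    (List.takeWhile_append_dropWhile (p := PySem.Chars.isspace) (l := l.toList))
  simp only [List.length_append] at hlen
  simp only [pvIndent, pvIndNat, PySem.Str.len_eq, PySem.Str.lstrip, String.toList_ofList,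
    PySem.Chars.lstrip]
  omega

lemma pvBlank_iff (l : String) :
    pvBlank l = true ↔ ∀ c ∈ l.toList, PySem.Chars.isspace c = true := by
  have h1 : pvBlank l = true ↔ (PySem.Str.strip l).toList = [] := by
    unfold pvBlank
    rw [beq_iff_eq]
    constructor
    · intro h; rw [h]; rfl
    · intro h; apply String.toList_inj.mp; rw [h]; rfl
  rw [h1, PySem.Str.toList_strip]
  simp only [PySem.Chars.strip, PySem.Chars.rstrip, PySem.Chars.lstrip,
    List.reverse_eq_nil_iff, List.dropWhile_eq_nil_iff, List.mem_reverse]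
  constructor
  · intro h c hc
    conv at hc => rw [← List.takeWhile_append_dropWhile (p := PySem.Chars.isspace) (l := l.toList)]
    rcases List.mem_append.mp hc with hc | hc
    · exact List.mem_takeWhile_imp hc
    · exact h c hc
  · intro h c hc
    exact h c ((List.dropWhile_sublist _).mem hc)

lemma pvIndNat_lt (l : String) (h : pvBlank l = false) : pvIndNat l < l.toList.length := by
  have hne : l.toList.dropWhile PySem.Chars.isspace ≠ [] := by
    intro hnil
    have : pvBlank l = true := (pvBlank_iff l).mpr (by
      intro c hc
      conv at hc => rw [← List.takeWhile_append_dropWhile (p := PySem.Chars.isspace) (l := l.toList)]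
      rcases List.mem_append.mp hc with hc | hc
      · exact List.mem_takeWhile_imp hc
      · rw [hnil] at hc; cases hc)
    rw [h] at this; cases this
  have hlen := congrArg List.length
    (List.takeWhile_append_dropWhile (p := PySem.Chars.isspace) (l := l.toList))
  simp only [List.length_append] at hlen
  have : 0 < (l.toList.dropWhile PySem.Chars.isspace).length := List.length_pos_of_ne_nil hne
  unfold pvIndNat
  omega

lemma pvIndNat_pos_iff (l : String) (c : Char) (cs : List Char) (hl : l.toList = c :: cs) :
    (1 ≤ pvIndNat l) ↔ PySem.Chars.isspace c = true := by
  unfold pvIndNat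
  rw [hl]
  cases hc : PySem.Chars.isspace c <;> simp [hc]

lemma pvGuard_iff (ls : List String) :
    pvPeelGuard ls = true ↔ ∀ l ∈ ls, pvBlank l = false → 1 ≤ pvIndNat l := by
  unfold pvPeelGuard
  rw [List.all_eq_true]
  apply forall_congr'; intro l
  apply imp_congr_right; intro _
  cases hb : pvBlank l with
  | true => simp
  | false =>
    simp only [Bool.false_eq_true, if_false]
    cases hlist : l.toList with
    | nil =>
      exfalso
      have : pvBlank l = true := (pvBlank_iff l).mpr (by intro c hc; rw [hlist] at hc; cases hc)
      rw [hb] at this; cases this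
    | cons c cs =>
      have hget : PySem.Str.pyGet? l 0 = some c := by
        simp [PySem.Str.pyGet?, PySem.Chars.pyGet?, PySem.List.pyGet?, PySem.List.pyIdx?, hlist]
      rw [hget]
      have hiff := pvIndNat_pos_iff l c cs hlist
      simp [← hiff]

lemma pvSlice1_toList (l : String) :
    (PySem.Str.slice l (some 1) none).toList = l.toList.tail := by
  simp [PySem.Str.toList_slice, PySem.Chars.slice_eq_listSlice, PySem.List.slice_from_one]

lemma pvBlank_tail (l : String) (h : pvBlank l = true) :
    pvBlank (PySem.Str.slice l (some 1) none) = true := by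
  rw [pvBlank_iff] at h ⊢
  intro c hc
  rw [pvSlice1_toList] at hc
  exact h c ((List.tail_sublist _).mem hc)

lemma pvNonblank_tail (l : String) (hnb : pvBlank l = false) (hind : 1 ≤ pvIndNat l) :
    pvBlank (PySem.Str.slice l (some 1) none) = false ∧
      pvIndNat (PySem.Str.slice l (some 1) none) = pvIndNat l - 1 := by
  cases hlist : l.toList with
  | nil =>
    exfalso
    have : pvBlank l = true := (pvBlank_iff l).mpr (by intro c hc; rw [hlist] at hc; cases hc)
    rw [hnb] at this; cases this
  | cons c cs =>
    have hc : PySem.Chars.isspace c = true := (pvIndNat_pos_iff l c cs hlist).mp hind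
    have htl : (PySem.Str.slice l (some 1) none).toList = cs := by
      rw [pvSlice1_toList, hlist]; rfl
    constructor
    · cases hbt : pvBlank (PySem.Str.slice l (some 1) none) with
      | false => rfl
      | true =>
        exfalso
        have hall := (pvBlank_iff _).mp hbt
        rw [htl] at hall
        have : pvBlank l = true := (pvBlank_iff l).mpr (by
          intro d hd; rw [hlist] at hd
          rcases List.mem_cons.mp hd with rfl | hd
          · exact hc
          · exact hall d hd)
        rw [hnb] at this; cases this
    · unfold pvIndNat
      rw [htl, hlist, List.takeWhile_cons_of_pos hc]
      simp

lemma pvPeel_eq (m : Nat) : ∀ (fuel : Nat) (ls : List String),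
    (∀ l ∈ ls, pvBlank l = false → m ≤ pvIndNat l) →
    (∃ l ∈ ls, pvBlank l = false ∧ pvIndNat l = m) →
    m ≤ fuel →
    (pvPeel fuel ls).map String.toList = ls.map (fun l => l.toList.drop m) := by
  induction m with
  | zero =>
    intro fuel ls _ hex _
    obtain ⟨l, hl, hnb, h0⟩ := hex
    have hg : pvPeelGuard ls = false := by
      cases hgc : pvPeelGuard ls with
      | false => rfl
      | true =>
        exfalso
        have := (pvGuard_iff ls).mp hgc l hl hnb
        omega
    cases fuel with
    | zero => simp [pvPeel]
    | succ f => simp [pvPeel, hg]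
  | succ k ih =>
    intro fuel ls hm hex hfuel
    have hg : pvPeelGuard ls = true := (pvGuard_iff ls).mpr (by
      intro l hl hnb
      have := hm l hl hnb
      omega)
    cases fuel with
    | zero => omega
    | succ f =>
      rw [pvPeel, if_pos hg]
      have hm' : ∀ l' ∈ ls.map (fun l => PySem.Str.slice l (some 1) none),
          pvBlank l' = false → k ≤ pvIndNat l' := by
        intro l' hl' hnb'
        obtain ⟨l, hl, rfl⟩ := List.mem_map.mp hl'
        cases hb : pvBlank l with
        | true => rw [pvBlank_tail l hb] at hnb'; cases hnb'
        | false =>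
          have h1 := hm l hl hb
          have := (pvNonblank_tail l hb (by omega)).2
          omega
      have hex' : ∃ l' ∈ ls.map (fun l => PySem.Str.slice l (some 1) none),
          pvBlank l' = false ∧ pvIndNat l' = k := by
        obtain ⟨l, hl, hnb, hk⟩ := hex
        obtain ⟨h1, h2⟩ := pvNonblank_tail l hnb (by omega)
        exact ⟨PySem.Str.slice l (some 1) none, List.mem_map_of_mem hl, h1, by omega⟩
      rw [ih f _ hm' hex' (by omega), List.map_map]
      apply List.map_congr_left
      intro l _
      simp only [Function.comp_apply, pvSlice1_toList, ← List.drop_one, List.drop_drop]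
      congr 1
      omega

-- ===== VERDICT (by name: the statement is the Claim_ definition above) =====
theorem stripCode_py_spec : Claim_equal_stripCode_py := by
  intro code _ hpre
  unfold Spec_stripCode_py
  unfold stripCode_py stripCode_py_alt
  simp only [pvFoldA_go]
  set L0 := PySem.Str.splitlines (PySem.Str.rstrip code) with hL0
  cases hL : L0.dropWhile pvBlank with
  | nil =>
    simp [PySem.Str.join, PySem.Chars.join, List.intercalate]
  | cons h t =>
    have hhead : pvBlank h = false := pvDropWhile_head pvBlank L0 h t hL
    set xs := (t.filter (fun l => !pvBlank l)).map pvIndNat with hxs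
    set m := xs.foldl min (pvIndNat h) with hmdef
    have hcast : ((m : Nat) : Int) =
        List.foldl min (pvIndent h) ((t.filter (fun l => !pvBlank l)).map pvIndent) := by
      rw [hmdef, pvFoldl_min_cast,
        show pvIndent = (fun l => ((pvIndNat l : Nat) : Int)) from funext pvIndent_eq]
      simp only [hxs, List.map_map, Function.comp_def]
    -- m is a lower bound of the non-blank indents of h :: t
    have hm_le : ∀ l ∈ h :: t, pvBlank l = false → m ≤ pvIndNat l := by
      intro l hl hnb
      apply pvFoldl_min_le_mem
      rcases List.mem_cons.mp hl with rfl | hlt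
      · exact List.mem_cons_self
      · exact List.mem_cons_of_mem _
          (hxs ▸ List.mem_map_of_mem (List.mem_filter.mpr ⟨hlt, by simp [hnb]⟩))
    -- and it is attained
    have hex : ∃ l ∈ h :: t, pvBlank l = false ∧ pvIndNat l = m := by
      have hmem := pvFoldl_min_mem xs (pvIndNat h)
      rcases List.mem_cons.mp hmem with he | he
      · exact ⟨h, List.mem_cons_self, hhead, he.symm⟩
      · rw [hxs] at he
        obtain ⟨l, hlf, hlv⟩ := List.mem_map.mp he
        obtain ⟨hlt, hlb⟩ := List.mem_filter.mp hlf
        exact ⟨l, List.mem_cons_of_mem _ hlt, by simpa using hlb, hlv⟩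
    have hfuel : m ≤ h.toList.length := by
      have h1 : m ≤ pvIndNat h := pvFoldl_min_le_mem xs _ _ List.mem_cons_self
      have h2 := pvIndNat_lt h hhead
      omega
    -- A's capped minimum equals m, thanks to Pre_
    have hmin : pvMinFold 99999999 L0 = (m : Int) := by
      rw [pvMinFold_dropWhile, hL, pvMinFold_eq]
      simp only [List.filter_cons, hhead, Bool.not_false, if_true, List.map_cons]
      show min 99999999
          (List.foldl min (pvIndent h) ((t.filter (fun l => !pvBlank l)).map pvIndent)) = (m : Int)
      rw [← hcast]
      have hexp : ∃ l ∈ L0, pvBlank l = false := by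
        refine ⟨h, ?_, hhead⟩
        have : h ∈ L0.dropWhile pvBlank := by rw [hL]; simp
        exact (L0.dropWhile_sublist pvBlank).mem this
      obtain ⟨l, hlmem, hlnb, hlle⟩ := hpre hexp
      have hlL : l ∈ h :: t := by
        rw [← hL]
        have hsplit : L0.takeWhile pvBlank ++ L0.dropWhile pvBlank = L0 :=
          List.takeWhile_append_dropWhile
        have hlmem' : l ∈ L0.takeWhile pvBlank ++ L0.dropWhile pvBlank := by
          rw [hsplit]; exact hlmem
        rcases List.mem_append.mp hlmem' with hcase | hcase
        · exact absurd (List.mem_takeWhile_imp hcase) (by simp [hlnb])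
        · exact hcase
      have hlm := hm_le l hlL hlnb
      rw [pvIndent_eq] at hlle
      omega
    -- the peeling loop removes exactly m characters from every line
    have hpeel : pvPeel h.toList.length (h :: t) =
        (h :: t).map (fun l => PySem.Str.slice l (some (m : Int)) none) := by
      have hinj : Function.Injective String.toList := fun a b hab => String.toList_inj.mp hab
      apply List.map_injective_iff.mpr hinj
      rw [pvPeel_eq m h.toList.length (h :: t) hm_le hex hfuel, List.map_map]
      apply List.map_congr_left
      intro l _
      simp only [Function.comp_apply, PySem.Str.toList_slice, PySem.Chars.slice_eq_listSlice,
        PySem.List.slice_from_natCast]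
    simp only [List.nil_append, hmin, hpeel, List.map_map]
    simp [Function.comp_def]
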